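-- pv_equiv track=rewrite | github.com/xinkaichen97/HackerRank | Data Science/psychometric.py | jobOffers
-- ===== SOURCE A (Python) =====
-- def jobOffers(scores, lowerLimits, upperLimits):
--     answer = []
--     for index, item in enumerate(lowerLimits):
--         dummy = []
--         for score in scores:
--             if score >= lowerLimits[index] and score <= upperLimits[index]:
--                 dummy.append(score)
--         if dummy:
--             answer.append(len(dummy))
--         else:
--             answer.append(0)
--     return answer
-- ===== SOURCE B (Python) =====
-- def _count_le(a, x):
--     # number of elements <= x in the sorted list a (hand-written bisect_right)
--     lo, hi = 0, len(a)
--     while lo < hi: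
--         mid = (lo + hi) // 2
--         if a[mid] <= x:
--             lo = mid + 1
--         else:
--             hi = mid
--     return lo
--
--
-- def jobOffers(scores, lowerLimits, upperLimits):
--     s = sorted(scores)
--     answer = []
--     for index in range(len(lowerLimits)):
--         c = _count_le(s, upperLimits[index]) - _count_le(s, lowerLimits[index] - 1)
--         answer.append(c if c > 0 else 0)
--     return answer
-- ===== Notes on version B (the rewrite author's own statement) =====
-- stated objective: faster
-- what changed: B sorts the scores once and answers each query with two hand-written binary searches (count of elements <= upper minus count <= lower-1), replacing A's full scan of scores per query.
-- outside the precondition, e.g. on jobOffers([], [1], []): A returns [0], B raises IndexError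
import Mathlib
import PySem

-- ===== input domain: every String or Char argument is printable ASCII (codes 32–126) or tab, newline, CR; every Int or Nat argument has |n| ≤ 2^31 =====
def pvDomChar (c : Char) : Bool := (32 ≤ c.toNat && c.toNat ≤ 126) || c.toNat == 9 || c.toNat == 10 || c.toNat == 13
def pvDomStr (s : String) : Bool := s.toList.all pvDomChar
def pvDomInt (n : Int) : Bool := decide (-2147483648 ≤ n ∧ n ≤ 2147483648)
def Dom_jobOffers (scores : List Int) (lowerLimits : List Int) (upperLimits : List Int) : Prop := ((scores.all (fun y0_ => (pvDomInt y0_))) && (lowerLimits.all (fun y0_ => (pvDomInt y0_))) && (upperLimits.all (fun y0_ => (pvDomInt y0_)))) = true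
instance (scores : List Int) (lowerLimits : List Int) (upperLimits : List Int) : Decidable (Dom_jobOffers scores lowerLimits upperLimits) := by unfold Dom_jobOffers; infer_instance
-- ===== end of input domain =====

-- B sorts the scores once and answers each query by two hand-written binary searches; objective: faster (asymptotic).


-- ===== PORT A =====
-- literal port of A; pyGetD stands for the (possibly raising) index access, Pre_ excludes the raising inputs
def jobOffers (scores : List Int) (lowerLimits : List Int) (upperLimits : List Int) : List Int :=
  (PySem.List.enumerate lowerLimits).foldl
    (fun answer p =>
      let dummy := scores.foldl
        (fun d score =>
          if PySem.List.pyGetD lowerLimits p.1 0 ≤ score ∧ score ≤ PySem.List.pyGetD upperLimits p.1 0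
          then d ++ [score] else d) []
      if dummy ≠ [] then answer ++ [(dummy.length : Int)] else answer ++ [(0 : Int)]) []

-- ===== PORT B =====
-- port of Source B's hand-written bisect-right loop (lo/hi are nonnegative Python ints, hence Nat);
-- the fuel only makes the while-loop total: hi - lo shrinks every iteration, so a.length iterations always suffice
def countLeLoop (a : List Int) (x : Int) : Nat → Nat → Nat → Nat
  | 0, lo, _ => lo
  | fuel + 1, lo, hi =>
    if lo < hi then
      let mid := (lo + hi) / 2
      if PySem.List.pyGetD a (mid : Int) 0 ≤ x then countLeLoop a x fuel (mid + 1) hi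
      else countLeLoop a x fuel lo mid
    else lo

def countLe (a : List Int) (x : Int) : Nat := countLeLoop a x a.length 0 a.length

-- pyGetD stands for the (possibly raising) index access, as in the A port; Pre_ excludes the raising inputs
def jobOffers_alt (scores : List Int) (lowerLimits : List Int) (upperLimits : List Int) : List Int :=
  let s := PySem.List.sorted scores id false
  (PySem.List.pyRange 0 lowerLimits.length 1).foldl
    (fun answer i =>
      let c : Int := (countLe s (PySem.List.pyGetD upperLimits i 0) : Int)
        - (countLe s (PySem.List.pyGetD lowerLimits i 0 - 1) : Int)
      answer ++ [if 0 < c then c else 0]) []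

-- ===== PRECONDITION & SPEC =====
-- Pre_ excludes malformed query lists with lowerLimits longer than upperLimits: past upperLimits' end
-- A raises IndexError as soon as some score reaches the lower bound (and otherwise returns accidental 0s
-- produced by short-circuit evaluation); B raises IndexError on every such input.
def Pre_jobOffers (scores : List Int) (lowerLimits : List Int) (upperLimits : List Int) : Prop :=
  lowerLimits.length ≤ upperLimits.length
instance (scores : List Int) (lowerLimits : List Int) (upperLimits : List Int) : Decidable (Pre_jobOffers scores lowerLimits upperLimits) := by unfold Pre_jobOffers; infer_instance

def pvWitness_jobOffers : List Int × List Int × List Int := ([1, 5, 3], [0, 4], [3, 9])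

def Spec_jobOffers (scores : List Int) (lowerLimits : List Int) (upperLimits : List Int) (out : List Int) : Prop := out = jobOffers_alt scores lowerLimits upperLimits
instance (scores : List Int) (lowerLimits : List Int) (upperLimits : List Int) (out : List Int) : Decidable (Spec_jobOffers scores lowerLimits upperLimits out) := by unfold Spec_jobOffers; infer_instance

-- ===== CLAIM (what is proved, stated in full; the proofs are below) =====
def Claim_equal_jobOffers : Prop := ∀ (scores : List Int) (lowerLimits : List Int) (upperLimits : List Int), Dom_jobOffers scores lowerLimits upperLimits → Pre_jobOffers scores lowerLimits upperLimits → Spec_jobOffers scores lowerLimits upperLimits (jobOffers scores lowerLimits upperLimits)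

-- ===== LEMMAS AND PROOFS =====

-- if every position below r satisfies p and every position from r on does not, countP p = r
lemma countP_of_split {p : Int → Bool} : ∀ (a : List Int) (r : Nat), r ≤ a.length →
    (∀ (i : Nat) (h : i < a.length), i < r → p a[i]) →
    (∀ (i : Nat) (h : i < a.length), r ≤ i → ¬ p a[i]) →
    a.countP p = r := by
  intro a
  induction a with
  | nil => intro r hr _ _; simp at hr; simp [hr]
  | cons hd tl ih =>
    intro r hr h1 h2
    cases r with
    | zero =>
      have hhd : ¬ p hd := by simpa using h2 0 (by simp) (by omega)
      have htl : tl.countP p = 0 := by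
        apply ih 0 (by omega) (fun i h hi => by omega)
        intro i h _
        simpa using h2 (i + 1) (by simpa using Nat.succ_lt_succ h) (by omega)
      simp [htl, hhd]
    | succ k =>
      have hhd : p hd := by simpa using h1 0 (by simp) (by omega)
      have htl : tl.countP p = k := by
        apply ih k (by simpa using hr)
        · intro i h hi
          simpa using h1 (i + 1) (by simpa using Nat.succ_lt_succ h) (by omega)
        · intro i h hi
          simpa using h2 (i + 1) (by simpa using Nat.succ_lt_succ h) (by omega)
      simp [htl, hhd]

lemma countLeLoop_spec (a : List Int) (x : Int) (hs : a.Pairwise (· ≤ ·)) :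
    ∀ (fuel lo hi : Nat), hi - lo ≤ fuel → lo ≤ hi → hi ≤ a.length →
      (∀ (i : Nat) (h : i < a.length), i < lo → a[i] ≤ x) →
      (∀ (i : Nat) (h : i < a.length), hi ≤ i → x < a[i]) →
      countLeLoop a x fuel lo hi = a.countP (fun v => decide (v ≤ x)) := by
  have hpg := List.pairwise_iff_getElem.mp hs
  intro fuel
  induction fuel with
  | zero =>
    intro lo hi hn hlohi hhi hlow hhigh
    have hle : lo = hi := by omega
    subst hle
    exact (countP_of_split a lo (by omega)
      (fun i hilen hi' => by simpa using hlow i hilen hi')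
      (fun i hilen hi' => by simpa using not_le.mpr (hhigh i hilen hi'))).symm
  | succ n ih =>
    intro lo hi hn hlohi hhi hlow hhigh
    show (if lo < hi then
        (if PySem.List.pyGetD a ((((lo + hi) / 2 : Nat)) : Int) 0 ≤ x then countLeLoop a x n ((lo + hi) / 2 + 1) hi
         else countLeLoop a x n lo ((lo + hi) / 2))
      else lo) = _
    split
    case isTrue h =>
      have hmlt : (lo + hi) / 2 < hi := by omega
      have hmlo : lo ≤ (lo + hi) / 2 := by omega
      have hmlen : (lo + hi) / 2 < a.length := by omega
      have hget : PySem.List.pyGetD a (((lo + hi) / 2 : Nat) : Int) 0 = a[(lo + hi) / 2] := by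
        rw [PySem.List.pyGetD_natCast]
        exact List.getD_eq_getElem a 0 hmlen
      simp only [hget]
      split
      case isTrue hmid =>
        apply ih _ _ (by omega) (by omega) hhi _ hhigh
        intro i hilen hi'
        rcases Nat.lt_succ_iff_lt_or_eq.mp hi' with hlt | heq
        · exact le_trans (hpg i ((lo + hi) / 2) hilen hmlen hlt) hmid
        · subst heq; exact hmid
      case isFalse hmid =>
        apply ih _ _ (by omega) (by omega) (by omega) hlow
        intro i hilen hi'
        rcases Nat.eq_or_lt_of_le hi' with heq | hlt
        · subst heq; exact lt_of_not_ge (fun hge => hmid hge)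
        · exact lt_of_lt_of_le (lt_of_not_ge (fun hge => hmid hge)) (hpg _ _ hmlen hilen hlt)
    case isFalse h =>
      have hle : lo = hi := by omega
      subst hle
      exact (countP_of_split a lo (by omega)
        (fun i hilen hi' => by simpa using hlow i hilen hi')
        (fun i hilen hi' => by simpa using not_le.mpr (hhigh i hilen hi'))).symm


lemma countLe_eq (a : List Int) (x : Int) (hs : a.Pairwise (· ≤ ·)) :
    countLe a x = a.countP (fun v => decide (v ≤ x)) := by
  unfold countLe
  exact countLeLoop_spec a x hs a.length 0 a.length (by omega) (by omega) (le_refl _)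
    (fun i h hi => by omega) (fun i h hi => by omega)

-- |{v ∈ l : lo ≤ v ≤ hi}| expressed through the two "count ≤" quantities, clamped at 0
lemma count_range_eq (l : List Int) (lo hi : Int) :
    ((l.countP (fun v => decide (lo ≤ v ∧ v ≤ hi)) : Int))
      = (if 0 < ((l.countP (fun v => decide (v ≤ hi)) : Int) - (l.countP (fun v => decide (v ≤ lo - 1)) : Int))
         then ((l.countP (fun v => decide (v ≤ hi)) : Int) - (l.countP (fun v => decide (v ≤ lo - 1)) : Int))
         else 0) := by
  by_cases hcase : lo - 1 ≤ hi
  · have hpart : l.countP (fun v => decide (lo ≤ v ∧ v ≤ hi)) + l.countP (fun v => decide (v ≤ lo - 1))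
        = l.countP (fun v => decide (v ≤ hi)) := by
      induction l with
      | nil => simp
      | cons hd tl iht =>
        simp only [List.countP_cons, decide_eq_true_eq]
        split_ifs <;> omega
    split_ifs with hpos <;> omega
  · have h0 : l.countP (fun v => decide (lo ≤ v ∧ v ≤ hi)) = 0 := by
      apply List.countP_eq_zero.mpr
      intro v _
      simp only [decide_eq_true_eq]
      omega
    have hm : l.countP (fun v => decide (v ≤ hi)) ≤ l.countP (fun v => decide (v ≤ lo - 1)) := by
      apply List.countP_mono_left
      intro v _ hv
      simp only [decide_eq_true_eq] at *
      omega
    rw [h0]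
    split_ifs with hpos <;> omega

theorem jobOffers_eq_map (scores lowerLimits upperLimits : List Int) :
    jobOffers scores lowerLimits upperLimits
      = (PySem.List.enumerate lowerLimits).map (fun p =>
          ((scores.filter (fun score =>
            decide (PySem.List.pyGetD lowerLimits p.1 0 ≤ score ∧ score ≤ PySem.List.pyGetD upperLimits p.1 0))).length : Int)) := by
  unfold jobOffers
  have hbody : (fun (answer : List Int) (p : Int × Int) =>
      let dummy := scores.foldl
        (fun d score =>
          if PySem.List.pyGetD lowerLimits p.1 0 ≤ score ∧ score ≤ PySem.List.pyGetD upperLimits p.1 0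
          then d ++ [score] else d) []
      if dummy ≠ [] then answer ++ [(dummy.length : Int)] else answer ++ [(0 : Int)])
      = (fun answer p => answer ++ [((scores.filter (fun score =>
            decide (PySem.List.pyGetD lowerLimits p.1 0 ≤ score ∧ score ≤ PySem.List.pyGetD upperLimits p.1 0))).length : Int)]) := by
    funext answer p
    show (let dummy := scores.foldl _ []; if dummy ≠ [] then answer ++ [(dummy.length : Int)] else answer ++ [(0 : Int)]) = _
    have hfold : scores.foldl
        (fun d score =>
          if PySem.List.pyGetD lowerLimits p.1 0 ≤ score ∧ score ≤ PySem.List.pyGetD upperLimits p.1 0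
          then d ++ [score] else d) []
        = scores.filter (fun score =>
            decide (PySem.List.pyGetD lowerLimits p.1 0 ≤ score ∧ score ≤ PySem.List.pyGetD upperLimits p.1 0)) := by
      have := PySem.List.foldl_append_if
        (fun score => decide (PySem.List.pyGetD lowerLimits p.1 0 ≤ score ∧ score ≤ PySem.List.pyGetD upperLimits p.1 0))
        (fun score => score) scores []
      simpa using this
    simp only [hfold]
    split
    · rfl
    · next hnil =>
      rw [not_not.mp (fun hne => hnil hne)]
      simp
  rw [hbody, PySem.List.foldl_append_singleton_eq_map]
  simp

theorem jobOffers_alt_eq_map (scores lowerLimits upperLimits : List Int) :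
    jobOffers_alt scores lowerLimits upperLimits
      = (PySem.List.pyRange 0 lowerLimits.length 1).map (fun i =>
          let c : Int := (countLe (PySem.List.sorted scores id false) (PySem.List.pyGetD upperLimits i 0) : Int)
            - (countLe (PySem.List.sorted scores id false) (PySem.List.pyGetD lowerLimits i 0 - 1) : Int)
          if 0 < c then c else 0) := by
  unfold jobOffers_alt
  rw [PySem.List.foldl_append_singleton_eq_map]
  simp

-- ===== VERDICT (by name: the statement is the Claim_ definition above) =====
theorem jobOffers_spec : Claim_equal_jobOffers := by
  intro scores lowerLimits upperLimits _hdom hpre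
  unfold Spec_jobOffers
  rw [jobOffers_eq_map, jobOffers_alt_eq_map]
  have hpre' : lowerLimits.length ≤ upperLimits.length := hpre
  have hs : (PySem.List.sorted scores id false).Pairwise (· ≤ ·) := by
    simpa using PySem.List.sorted_pairwise scores id
  have hperm : (PySem.List.sorted scores id false).Perm scores := PySem.List.sorted_perm scores id false
  apply List.ext_getElem
  · simp [PySem.List.length_enumerate, PySem.List.length_pyRange_one]
  · intro i hi1 hi2
    have hilo : i < lowerLimits.length := by
      simpa [PySem.List.length_enumerate] using hi1
    have hiup : i < upperLimits.length := lt_of_lt_of_le hilo hpre'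
    rw [List.getElem_map, List.getElem_map]
    have he : (PySem.List.enumerate lowerLimits)[i]'(by simpa [PySem.List.length_enumerate] using hilo)
        = ((i : Int), lowerLimits[i]) := by
      simpa using PySem.List.getElem_enumerate (xs := lowerLimits) (s := 0) (k := i)
        (by simpa [PySem.List.length_enumerate] using hilo)
    have hr : (PySem.List.pyRange 0 lowerLimits.length 1)[i]'(by simpa [PySem.List.length_pyRange_one] using hilo) = (i : Int) := by
      rw [PySem.List.getElem_pyRange_one]
      simp
    rw [he, hr]
    have hglo : PySem.List.pyGetD lowerLimits ((i : Nat) : Int) 0 = lowerLimits[i] := by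
      rw [PySem.List.pyGetD_natCast]; exact List.getD_eq_getElem lowerLimits 0 hilo
    have hgup : PySem.List.pyGetD upperLimits ((i : Nat) : Int) 0 = upperLimits[i] := by
      rw [PySem.List.pyGetD_natCast]; exact List.getD_eq_getElem upperLimits 0 hiup
    simp only [hglo, hgup]
    rw [← List.countP_eq_length_filter]
    rw [countLe_eq _ _ hs, countLe_eq _ _ hs,
        hperm.countP_eq, hperm.countP_eq]
    exact count_range_eq scores lowerLimits[i] upperLimits[i]
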